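-- pv_equiv track=rewrite | github.com/HyperDusXDeveloper/CSBU_Y2 | CE311 Datastucture/Week 4/test.py | FindLinesWithLowercase
-- ===== SOURCE A (Python) =====
-- def FindLinesWithLowercase(data,row,col):
--     if row >= len(data):
--         return []
--
--     if col >= len(data[row]):
--         return FindLinesWithLowercase(data,row+1,0)
--
--     if data[row][col].islower():
--         return [row] + FindLinesWithLowercase(data,row+1,0)
--
--     return FindLinesWithLowercase(data,row,col+1)
-- ===== SOURCE B (Python) =====
-- def FindLinesWithLowercase(data, row, col):
--     # Iterative row-by-row scan; the col offset applies only to the first row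
--     # (clamped to 0, matching Python's negative-index walk that ends up
--     # covering the whole row).
--     res = []
--     r = row
--     start = max(col, 0)
--     while r < len(data):
--         if any(ch.islower() for ch in data[r][start:]):
--             res.append(r)
--         r += 1
--         start = 0
--     return res
-- ===== Notes on version B (the rewrite author's own statement) =====
-- stated objective: idiomatic
-- what changed: Replaced the character-level recursion (one recursive call per character) by a single while-loop over rows with a per-row any(islower) test on the row's tail slice.
import Mathlib
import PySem

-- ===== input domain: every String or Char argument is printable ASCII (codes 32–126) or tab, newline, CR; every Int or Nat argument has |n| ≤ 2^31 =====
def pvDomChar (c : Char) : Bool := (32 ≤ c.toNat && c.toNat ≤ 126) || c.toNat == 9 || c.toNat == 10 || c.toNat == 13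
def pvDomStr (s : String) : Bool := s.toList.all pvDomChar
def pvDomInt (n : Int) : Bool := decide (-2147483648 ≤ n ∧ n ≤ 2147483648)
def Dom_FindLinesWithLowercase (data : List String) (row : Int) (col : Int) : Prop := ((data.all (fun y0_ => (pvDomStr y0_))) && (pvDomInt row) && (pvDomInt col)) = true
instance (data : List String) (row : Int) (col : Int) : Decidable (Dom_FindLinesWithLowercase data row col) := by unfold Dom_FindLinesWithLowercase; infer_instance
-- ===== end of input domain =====

-- B replaces A's per-character recursion by one while-loop over rows with an
-- any-lowercase test on each row's tail slice (idiomatic; same cost).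

-- ===== PORT A =====
def FindLinesWithLowercase (data : List String) (row : Int) (col : Int) : List Int :=
  if _h1 : row ≥ (data.length : Int) then []
  else
    match _hs : PySem.List.pyGet? data row with
    | none => []   -- Python raises IndexError here (row < -len(data)); excluded by Pre_
    | some s =>
      if _h2 : col ≥ PySem.Str.len s then FindLinesWithLowercase data (row + 1) 0
      else
        match PySem.Str.pyGet? s col with
        | none => []   -- Python raises IndexError here (col < -len(data[row])); excluded by Pre_
        | some c =>
          if PySem.Chars.islower c then row :: FindLinesWithLowercase data (row + 1) 0
          else FindLinesWithLowercase data (row, col + 1).1 (row, col + 1).2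
termination_by (((data.length : Int) - row).toNat,
  (PySem.Str.len (((PySem.List.pyGet? data row).getD "")) - col).toNat)
decreasing_by
  · left; omega
  · left; omega
  · right
    simp only [_hs, Option.getD_some]
    omega

-- ===== PORT B =====
-- the while loop of Source B: r runs from row; start is the first row's offset, 0 afterwards
def pvAltGo (data : List String) (r : Int) (start : Int) (res : List Int) : List Int :=
  if _h : r < (data.length : Int) then
    pvAltGo data (r + 1) 0
      (match PySem.List.pyGet? data r with
       | none => res   -- Python raises IndexError here; excluded by Pre_
       | some s =>
         if (PySem.Str.slice s (some start) none).toList.any PySem.Chars.islower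
         then res ++ [r] else res)
  else res
termination_by ((data.length : Int) - r).toNat
decreasing_by omega

def FindLinesWithLowercase_alt (data : List String) (row : Int) (col : Int) : List Int :=
  pvAltGo data row (max col 0) []

-- ===== PRECONDITION & SPEC =====
-- Pre_ excludes exactly the inputs where A raises IndexError: a starting row below
-- -len(data) (with row < len(data)), or a col below -len(data[row]) on the first row.
def Pre_FindLinesWithLowercase (data : List String) (row : Int) (col : Int) : Prop :=
  row ≥ (data.length : Int) ∨
    (-(data.length : Int) ≤ row ∧ -(PySem.Str.len (PySem.List.pyGetD data row "")) ≤ col)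
instance (data : List String) (row : Int) (col : Int) : Decidable (Pre_FindLinesWithLowercase data row col) := by unfold Pre_FindLinesWithLowercase; infer_instance

def pvWitness_FindLinesWithLowercase : List String × Int × Int := (["Ab", "XY"], 0, 0)

def Spec_FindLinesWithLowercase (data : List String) (row : Int) (col : Int) (out : List Int) : Prop := out = FindLinesWithLowercase_alt data row col
instance (data : List String) (row : Int) (col : Int) (out : List Int) : Decidable (Spec_FindLinesWithLowercase data row col out) := by unfold Spec_FindLinesWithLowercase; infer_instance

-- ===== CLAIM (what is proved, stated in full; the proofs are below) =====
def Claim_equal_FindLinesWithLowercase : Prop := ∀ (data : List String) (row : Int) (col : Int), Dom_FindLinesWithLowercase data row col → Pre_FindLinesWithLowercase data row col → Spec_FindLinesWithLowercase data row col (FindLinesWithLowercase data row col)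

-- ===== LEMMAS AND PROOFS =====

-- one-step unfolding helpers for the two ports
lemma pvA_stop (data : List String) (row col : Int) (h : row ≥ (data.length : Int)) :
    FindLinesWithLowercase data row col = [] := by
  rw [FindLinesWithLowercase, dif_pos h]

lemma pvA_unfold (data : List String) (row col : Int) (s : String)
    (hrow : ¬ row ≥ (data.length : Int)) (hs : PySem.List.pyGet? data row = some s) :
    FindLinesWithLowercase data row col =
      (if _hge : col ≥ PySem.Str.len s then FindLinesWithLowercase data (row + 1) 0
       else
         match PySem.Str.pyGet? s col with
         | none => []
         | some c =>
           if PySem.Chars.islower c then row :: FindLinesWithLowercase data (row + 1) 0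
           else FindLinesWithLowercase data row (col + 1)) := by
  rw [FindLinesWithLowercase, dif_neg hrow]
  split
  next heq => rw [hs] at heq; cases heq
  next s' heq =>
    rw [hs] at heq
    injection heq with h
    subst h
    rfl

lemma pvAltGo_stop (data : List String) (r start : Int) (res : List Int)
    (hr : ¬ r < (data.length : Int)) : pvAltGo data r start res = res := by
  rw [pvAltGo, dif_neg hr]

lemma pvAltGo_step (data : List String) (r start : Int) (res : List Int) (s : String)
    (hr : r < (data.length : Int)) (hs : PySem.List.pyGet? data r = some s) :
    pvAltGo data r start res =
      pvAltGo data (r + 1) 0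
        (if (PySem.Str.slice s (some start) none).toList.any PySem.Chars.islower
         then res ++ [r] else res) := by
  rw [pvAltGo, dif_pos hr, hs]

lemma pvAltGo_step_none (data : List String) (r start : Int) (res : List Int)
    (hr : r < (data.length : Int)) (hpg : PySem.List.pyGet? data r = none) :
    pvAltGo data r start res = pvAltGo data (r + 1) 0 res := by
  rw [pvAltGo, dif_pos hr, hpg]

lemma pvA_unfold_char (data : List String) (row col : Int) (s : String) (c : Char)
    (hrow : ¬ row ≥ (data.length : Int)) (hs : PySem.List.pyGet? data row = some s)
    (hge : ¬ col ≥ PySem.Str.len s) (hc : PySem.Str.pyGet? s col = some c) :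
    FindLinesWithLowercase data row col =
      (if PySem.Chars.islower c then row :: FindLinesWithLowercase data (row + 1) 0
       else FindLinesWithLowercase data row (col + 1)) := by
  rw [pvA_unfold data row col s hrow hs, dif_neg hge, hc]

-- accumulator law for B's loop
lemma pvAltGo_acc (data : List String) (r start : Int) (res : List Int) :
    pvAltGo data r start res = res ++ pvAltGo data r start [] := by
  have H : ∀ (n : Nat) (r start : Int) (res : List Int),
      ((data.length : Int) - r).toNat ≤ n →
      pvAltGo data r start res = res ++ pvAltGo data r start [] := by
    intro n
    induction n with
    | zero =>
      intro r start res h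
      have hr : ¬ r < (data.length : Int) := by omega
      rw [pvAltGo_stop data r start res hr, pvAltGo_stop data r start [] hr]
      simp
    | succ n ih =>
      intro r start res h
      by_cases hr : r < (data.length : Int)
      · cases hpg : PySem.List.pyGet? data r with
        | none =>
          rw [pvAltGo_step_none data r start res hr hpg,
              pvAltGo_step_none data r start [] hr hpg]
          rw [ih (r + 1) 0 res (by omega)]
        | some s =>
          rw [pvAltGo_step data r start res s hr hpg,
              pvAltGo_step data r start [] s hr hpg]
          rw [ih (r + 1) 0 _ (by omega),
              ih (r + 1) 0
                (if (PySem.Str.slice s (some start) none).toList.any PySem.Chars.islower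
                 then [] ++ [r] else []) (by omega)]
          by_cases hl : (PySem.Str.slice s (some start) none).toList.any PySem.Chars.islower = true
          · rw [if_pos hl, if_pos hl]
            simp
          · rw [if_neg hl, if_neg hl]
            simp
      · rw [pvAltGo_stop data r start res hr, pvAltGo_stop data r start [] hr]
        simp
  exact H (((data.length : Int) - r).toNat) r start res le_rfl

-- A's column scan on one row computes the any-lowercase test on the clamped tail
lemma pvA_col (data : List String) (row : Int) (s : String)
    (hs : PySem.List.pyGet? data row = some s) (hrow : ¬ row ≥ (data.length : Int))
    (col : Int) (hcol : -(PySem.Str.len s) ≤ col) :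
    FindLinesWithLowercase data row col =
      (if (s.toList.drop (max col 0).toNat).any PySem.Chars.islower
       then row :: FindLinesWithLowercase data (row + 1) 0
       else FindLinesWithLowercase data (row + 1) 0) := by
  have hlen := PySem.Str.len_eq s
  have hlen2 : s.toList.length = s.length := by simp
  have H : ∀ (n : Nat) (col : Int), -(PySem.Str.len s) ≤ col →
      (PySem.Str.len s - col).toNat ≤ n →
      FindLinesWithLowercase data row col =
        (if (s.toList.drop (max col 0).toNat).any PySem.Chars.islower
         then row :: FindLinesWithLowercase data (row + 1) 0
         else FindLinesWithLowercase data (row + 1) 0) := by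
    intro n
    induction n with
    | zero =>
      intro col h1 h2
      have hge : col ≥ PySem.Str.len s := by omega
      have hge' : (s.toList.length : Int) ≤ col := hlen ▸ hge
      rw [pvA_unfold data row col s hrow hs, dif_pos hge]
      rw [List.drop_of_length_le (by omega : s.toList.length ≤ (max col 0).toNat)]
      simp
    | succ n ih =>
      intro col h1 h2
      by_cases hge : col ≥ PySem.Str.len s
      · have hge' : (s.toList.length : Int) ≤ col := hlen ▸ hge
        rw [pvA_unfold data row col s hrow hs, dif_pos hge]
        rw [List.drop_of_length_le (by omega : s.toList.length ≤ (max col 0).toNat)]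
        simp
      · obtain ⟨c, hc⟩ : ∃ c, PySem.Str.pyGet? s col = some c := by
          cases hpg : PySem.Str.pyGet? s col with
          | none =>
            exfalso
            have hni : ¬ PySem.Raise.InRange s.toList.length col :=
              (PySem.List.pyGet?_eq_none_iff s.toList col).mp hpg
            simp [PySem.Raise.InRange] at hni
            omega
          | some c => exact ⟨c, rfl⟩
        have hcl : PySem.List.pyGet? s.toList col = some c := hc
        by_cases hl : PySem.Chars.islower c
        · have hany : (s.toList.drop (max col 0).toNat).any PySem.Chars.islower = true := by
            rw [List.any_eq_true]
            refine ⟨c, ?_, hl⟩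
            by_cases h0 : 0 ≤ col
            · have hm : (max col 0) = col := by omega
              rw [hm]
              have hg := PySem.List.pyGet?_of_nonneg s.toList h0
              rw [hg] at hcl
              apply List.mem_of_getElem? (i := 0)
              rw [List.getElem?_drop]
              simpa using hcl
            · have hm : (max col 0) = 0 := by omega
              rw [hm]
              simpa using PySem.List.mem_of_pyGet?_eq_some s.toList hcl
          rw [pvA_unfold_char data row col s c hrow hs hge hc, if_pos hl, if_pos hany]
        · have hlf : PySem.Chars.islower c = false := by simpa using hl
          have htail : (s.toList.drop (max col 0).toNat).any PySem.Chars.islower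
              = (s.toList.drop (max (col + 1) 0).toNat).any PySem.Chars.islower := by
            by_cases h0 : 0 ≤ col
            · have hk : col.toNat < s.toList.length := by omega
              have hdrop : s.toList.drop (max col 0).toNat
                  = s.toList[col.toNat] :: s.toList.drop (max (col + 1) 0).toNat := by
                rw [(by omega : (max col 0).toNat = col.toNat),
                    (by omega : (max (col + 1) 0).toNat = col.toNat + 1)]
                exact List.drop_eq_getElem_cons hk
              have hgc : s.toList[col.toNat] = c := by
                have hg := PySem.List.pyGet?_of_nonneg s.toList h0
                rw [hg, List.getElem?_eq_getElem hk] at hcl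
                exact Option.some.inj hcl
              rw [hdrop, hgc, List.any_cons, hlf, Bool.false_or]
            · rw [(by omega : max col 0 = max (col + 1) 0)]
          rw [pvA_unfold_char data row col s c hrow hs hge hc, if_neg hl,
              ih (col + 1) (by omega) (by omega), htail]
  exact H ((PySem.Str.len s - col).toNat) col hcol le_rfl

lemma pvMain (data : List String) (row col : Int)
    (hrow : -(data.length : Int) ≤ row)
    (hcol : row < (data.length : Int) → -(PySem.Str.len (PySem.List.pyGetD data row "")) ≤ col) :
    FindLinesWithLowercase data row col = pvAltGo data row (max col 0) [] := by
  have H : ∀ (n : Nat) (row col : Int), -(data.length : Int) ≤ row →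
      (row < (data.length : Int) → -(PySem.Str.len (PySem.List.pyGetD data row "")) ≤ col) →
      ((data.length : Int) - row).toNat ≤ n →
      FindLinesWithLowercase data row col = pvAltGo data row (max col 0) [] := by
    intro n
    induction n with
    | zero =>
      intro row col h1 _h2 h3
      rw [pvA_stop data row col (by omega), pvAltGo_stop data row (max col 0) [] (by omega)]
    | succ n ih =>
      intro row col h1 hcol h3
      by_cases hr : row < (data.length : Int)
      · obtain ⟨s, hs⟩ : ∃ s, PySem.List.pyGet? data row = some s := by
          cases hpg : PySem.List.pyGet? data row with
          | none =>
            exfalso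
            have hni : ¬ PySem.Raise.InRange data.length row :=
              (PySem.List.pyGet?_eq_none_iff data row).mp hpg
            simp [PySem.Raise.InRange] at hni
            omega
          | some s => exact ⟨s, rfl⟩
        have hgetD : PySem.List.pyGetD data row "" = s := by
          have e : PySem.List.pyGetD data row "" = (PySem.List.pyGet? data row).getD "" := by
            simp [PySem.List.pyGetD, PySem.List.pyGet?]
          rw [e, hs]
          rfl
        have hc : -(PySem.Str.len s) ≤ col := by
          have h' := hcol hr
          rw [hgetD] at h'
          exact h'
        have hslice : (PySem.Str.slice s (some (max col 0)) none).toList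
            = s.toList.drop (max col 0).toNat := by
          rw [show (PySem.Str.slice s (some (max col 0)) none).toList
              = PySem.List.slice s.toList (some (max col 0)) none by simp [PySem.Str.slice]]
          exact PySem.List.slice_from s.toList (by omega)
        have hnext : FindLinesWithLowercase data (row + 1) 0 = pvAltGo data (row + 1) 0 [] := by
          have h' := ih (row + 1) 0 (by omega)
            (fun _ => by
              have := PySem.Str.len_eq (PySem.List.pyGetD data (row + 1) "")
              omega)
            (by omega)
          simpa using h'
        rw [pvA_col data row s hs (by omega) col hc,
            pvAltGo_step data row (max col 0) [] s hr hs,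
            pvAltGo_acc data (row + 1) 0, hslice, hnext]
        by_cases hl : (s.toList.drop (max col 0).toNat).any PySem.Chars.islower <;> simp [hl]
      · rw [pvA_stop data row col (by omega), pvAltGo_stop data row (max col 0) [] hr]
  exact H (((data.length : Int) - row).toNat) row col hrow hcol le_rfl

-- ===== VERDICT (by name: the statement is the Claim_ definition above) =====
theorem FindLinesWithLowercase_spec : Claim_equal_FindLinesWithLowercase := by
  intro data row col _hd hpre
  unfold Spec_FindLinesWithLowercase FindLinesWithLowercase_alt
  rcases hpre with h | ⟨h1, h2⟩
  · apply pvMain data row col (by omega) (fun hlt => absurd hlt (by omega))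
  · exact pvMain data row col h1 (fun _ => h2)
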